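-- pv_equiv track=rewrite | github.com/touqeerShah/multivector-rag | src/retrieval/colbert_service.py | _safe_partition_count
-- ===== SOURCE A (Python) =====
-- def _safe_partition_count(
--     requested: int,
--     sample_embeddings: int,
--     max_partitions: int,
-- ) -> int:
--     capped = max(1, min(requested, sample_embeddings, max_partitions))
--
--     power_of_two = 1
--     while (power_of_two * 2) <= capped:
--         power_of_two *= 2
--
--     return power_of_two
-- ===== SOURCE B (Python) =====
-- def _safe_partition_count(
--     requested: int,
--     sample_embeddings: int,
--     max_partitions: int,
-- ) -> int:
--     capped = max(1, min(requested, sample_embeddings, max_partitions))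
--     return 1 << (capped.bit_length() - 1)
-- ===== Notes on version B (the rewrite author's own statement) =====
-- stated objective: idiomatic
-- what changed: The doubling while-loop is replaced by the bit-length closed form 1 << (capped.bit_length() - 1); no loop, no accumulator.
import Mathlib
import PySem

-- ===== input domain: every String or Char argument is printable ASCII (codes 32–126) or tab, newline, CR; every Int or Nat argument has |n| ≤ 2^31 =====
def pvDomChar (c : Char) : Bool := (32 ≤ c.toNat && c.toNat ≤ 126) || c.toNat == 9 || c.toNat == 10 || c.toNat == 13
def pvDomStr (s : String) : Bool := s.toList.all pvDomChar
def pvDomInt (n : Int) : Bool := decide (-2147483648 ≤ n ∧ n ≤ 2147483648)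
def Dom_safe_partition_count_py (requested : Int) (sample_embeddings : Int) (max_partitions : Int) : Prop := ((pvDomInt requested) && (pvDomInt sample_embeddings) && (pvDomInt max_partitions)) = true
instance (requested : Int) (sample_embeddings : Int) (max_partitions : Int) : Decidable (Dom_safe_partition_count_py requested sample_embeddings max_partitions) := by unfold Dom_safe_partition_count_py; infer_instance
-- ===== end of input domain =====

-- B replaces A's doubling while-loop by the bit-length closed form (idiomatic, loop-free).

-- ===== PORT A =====
-- A's while-loop: power_of_two starts at 1 and doubles while power_of_two*2 ≤ capped.
-- The 1 ≤ p hypothesis only justifies termination (Python terminates since capped ≥ 1).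
def pvLoopA (capped p : Int) (hp : 1 ≤ p) : Int :=
  if h : p * 2 ≤ capped then pvLoopA capped (p * 2) (by omega) else p
termination_by (capped - p).toNat
decreasing_by omega

def safe_partition_count_py (requested : Int) (sample_embeddings : Int) (max_partitions : Int) : Int :=
  let capped := max 1 (min requested (min sample_embeddings max_partitions))
  pvLoopA capped 1 (by norm_num)

-- ===== PORT B =====
-- int.bit_length(): 0 for 0, otherwise log2 n + 1 (exact for the n ≥ 0 values reached here)
def pvBitLength (n : Nat) : Nat := if n = 0 then 0 else Nat.log2 n + 1

def safe_partition_count_py_alt (requested : Int) (sample_embeddings : Int) (max_partitions : Int) : Int :=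
  let capped := max 1 (min requested (min sample_embeddings max_partitions))
  ((1 <<< (pvBitLength capped.toNat - 1) : Nat) : Int)

-- ===== PRECONDITION & SPEC =====
def Spec_safe_partition_count_py (requested : Int) (sample_embeddings : Int) (max_partitions : Int) (out : Int) : Prop := out = safe_partition_count_py_alt requested sample_embeddings max_partitions
instance (requested : Int) (sample_embeddings : Int) (max_partitions : Int) (out : Int) : Decidable (Spec_safe_partition_count_py requested sample_embeddings max_partitions out) := by unfold Spec_safe_partition_count_py; infer_instance

-- ===== CLAIM (what is proved, stated in full; the proofs are below) =====
def Claim_equal_safe_partition_count_py : Prop := ∀ (requested : Int) (sample_embeddings : Int) (max_partitions : Int), Dom_safe_partition_count_py requested sample_embeddings max_partitions → Spec_safe_partition_count_py requested sample_embeddings max_partitions (safe_partition_count_py requested sample_embeddings max_partitions)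

-- ===== LEMMAS AND PROOFS =====
lemma pvLoopA_inv (capped p : Int) (hp : 1 ≤ p) (hpc : p ≤ capped) :
    ∃ k : Nat, pvLoopA capped p hp = p * 2 ^ k ∧ p * 2 ^ k ≤ capped ∧ capped < p * 2 ^ (k + 1) := by
  fun_induction pvLoopA capped p hp with
  | case1 p hp h ih =>
      obtain ⟨k, hk1, hk2, hk3⟩ := ih h
      exact ⟨k + 1, by rw [hk1]; ring, by rw [show p * 2 ^ (k+1) = p * 2 * 2 ^ k by ring]; exact hk2,
             by rw [show p * 2 ^ (k+1+1) = p * 2 * 2 ^ (k+1) by ring]; exact hk3⟩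
  | case2 p hp h =>
      exact ⟨0, by ring, by simpa using hpc, by simp; omega⟩

theorem safe_partition_count_py_spec_aux (requested sample_embeddings max_partitions : Int) :
    safe_partition_count_py requested sample_embeddings max_partitions
      = safe_partition_count_py_alt requested sample_embeddings max_partitions := by
  unfold safe_partition_count_py safe_partition_count_py_alt
  set capped := max 1 (min requested (min sample_embeddings max_partitions)) with hc
  have hc1 : 1 ≤ capped := le_max_left _ _
  obtain ⟨k, hk1, hk2, hk3⟩ := pvLoopA_inv capped 1 (by norm_num) hc1
  simp only [one_mul] at hk1 hk2 hk3
  have hcn : capped = (capped.toNat : Int) := by omega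
  have h2 : (2 : Int) ^ k = ((2 ^ k : Nat) : Int) := by push_cast; ring
  have hlo : 2 ^ k ≤ capped.toNat := by omega
  have hhi : capped.toNat < 2 ^ (k + 1) := by
    have : (2 : Int) ^ (k+1) = ((2 ^ (k+1) : Nat) : Int) := by push_cast; ring
    omega
  have hne : capped.toNat ≠ 0 := by omega
  have hlog : Nat.log2 capped.toNat = k := by
    rw [Nat.log2_eq_log_two]
    exact Nat.log_eq_of_pow_le_of_lt_pow hlo hhi
  rw [hk1]
  simp only [pvBitLength, hne, if_false, hlog, Nat.add_sub_cancel, Nat.one_shiftLeft]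
  exact h2

-- ===== VERDICT (by name: the statement is the Claim_ definition above) =====
theorem safe_partition_count_py_spec : Claim_equal_safe_partition_count_py := by
  intro r s m _
  exact safe_partition_count_py_spec_aux r s m
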